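-- pv_equiv track=rewrite | github.com/casperfibaek/buteo | buteo/utils/core_utils.py | divide_into_steps
-- ===== SOURCE A (Python) =====
-- def divide_into_steps(
--     total: int,
--     step: int,
-- ):
--     """
--     Divide a number into steps.
--
--     Args:
--         total int: The total number.
--         step int: The step size.
--
--     Returns:
--         list: The list of steps.
--     """
--     assert isinstance(total, int), "total must be an integer."
--     assert isinstance(step, int), "step must be an integer."
--
--     steps = []
--     remainder = total % step
--     divided = int(total / step)
--     for _ in range(step):
--         if remainder > 0:
--             steps.append(divided + 1)
--             remainder -= 1
--         else:
--             steps.append(divided)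
--
--     return steps
-- ===== SOURCE B (Python) =====
-- def divide_into_steps(
--     total: int,
--     step: int,
-- ):
--     """
--     Divide a number into steps via a cumulative quota function:
--     after i parts, boundary(i) = divided*i + min(i, remainder) units have been
--     allocated; part i is the difference of two consecutive boundaries.
--     """
--     assert isinstance(total, int), "total must be an integer."
--     assert isinstance(step, int), "step must be an integer."
--
--     remainder = total % step
--     divided = int(total / step)
--
--     def boundary(i):
--         return divided * i + min(i, remainder)
--
--     return [boundary(i + 1) - boundary(i) for i in range(step)]
-- ===== Notes on version B (the rewrite author's own statement) =====
-- stated objective: alternative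
-- what changed: Replaced the stateful loop with a mutable remainder countdown by a stateless cumulative-quota formulation: part i is boundary(i+1)-boundary(i) where boundary(i)=divided*i+min(i,remainder) is the closed-form total allocated after i parts.
import Mathlib
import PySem

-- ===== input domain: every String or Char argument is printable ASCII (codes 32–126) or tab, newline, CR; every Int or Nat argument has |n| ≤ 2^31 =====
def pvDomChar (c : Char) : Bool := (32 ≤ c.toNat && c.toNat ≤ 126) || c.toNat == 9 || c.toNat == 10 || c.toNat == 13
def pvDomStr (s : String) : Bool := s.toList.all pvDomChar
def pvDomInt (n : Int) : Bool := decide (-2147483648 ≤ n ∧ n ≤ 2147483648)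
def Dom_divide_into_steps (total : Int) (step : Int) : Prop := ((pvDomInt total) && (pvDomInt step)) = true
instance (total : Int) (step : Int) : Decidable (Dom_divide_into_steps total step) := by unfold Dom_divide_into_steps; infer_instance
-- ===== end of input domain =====

-- B replaces A's stateful countdown loop by a stateless cumulative-quota formula (part i = boundary(i+1) - boundary(i)); alternative algorithm, same cost.


-- ===== PORT A =====
-- int(total / step) truncates toward zero; on Dom (|total| ≤ 2^31 < 2^53) the float
-- division is exact enough that int() of it equals exact truncating division Int.tdiv.
def divide_into_steps (total : Int) (step : Int) : List Int :=
  let remainder := PySem.Int.mod total step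
  let divided := Int.tdiv total step
  ((PySem.List.pyRange 0 step 1).foldl
    (fun (st : List Int × Int) _ =>
      if st.2 > 0 then (st.1 ++ [divided + 1], st.2 - 1)
      else (st.1 ++ [divided], st.2)) ([], remainder)).1

-- ===== PORT B =====
-- int(total / step) ported as Int.tdiv, exact on Dom as above.
def divide_into_steps_alt (total : Int) (step : Int) : List Int :=
  let remainder := PySem.Int.mod total step
  let divided := Int.tdiv total step
  let boundary := fun (i : Int) => divided * i + min i remainder
  (PySem.List.pyRange 0 step 1).map (fun i => boundary (i + 1) - boundary i)

-- ===== PRECONDITION & SPEC =====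
-- Pre_ excludes exactly step = 0, on which A raises ZeroDivisionError.
def Pre_divide_into_steps (total : Int) (step : Int) : Prop := step ≠ 0
instance (total : Int) (step : Int) : Decidable (Pre_divide_into_steps total step) := by unfold Pre_divide_into_steps; infer_instance
def pvWitness_divide_into_steps : Int × Int := (7, 3)

def Spec_divide_into_steps (total : Int) (step : Int) (out : List Int) : Prop := out = divide_into_steps_alt total step
instance (total : Int) (step : Int) (out : List Int) : Decidable (Spec_divide_into_steps total step out) := by unfold Spec_divide_into_steps; infer_instance

-- ===== CLAIM (what is proved, stated in full; the proofs are below) =====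
def Claim_equal_divide_into_steps : Prop := ∀ (total : Int) (step : Int), Dom_divide_into_steps total step → Pre_divide_into_steps total step → Spec_divide_into_steps total step (divide_into_steps total step)

-- ===== LEMMAS AND PROOFS =====
-- A's loop produces r copies of d+1 followed by the rest d.
theorem loop_replicate (d : Int) : ∀ (l : List Int) (acc : List Int) (r : Int), 0 ≤ r → r ≤ l.length →
    (l.foldl (fun (st : List Int × Int) _ =>
      if st.2 > 0 then (st.1 ++ [d + 1], st.2 - 1)
      else (st.1 ++ [d], st.2)) (acc, r)).1
    = acc ++ List.replicate r.toNat (d + 1) ++ List.replicate (l.length - r.toNat) d := by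
  intro l
  induction l with
  | nil =>
    intro acc r h0 hle
    have : r = 0 := le_antisymm (by simpa using hle) h0
    simp [this]
  | cons x xs ih =>
    intro acc r h0 hle
    by_cases hr : r > 0
    · have h0' : 0 ≤ r - 1 := by omega
      have hle' : r - 1 ≤ (xs.length : Int) := by
        simp at hle; omega
      have := ih (acc ++ [d + 1]) (r - 1) h0' hle'
      simp only [List.foldl_cons, if_pos hr] at *
      rw [this]
      have h1 : r.toNat = (r - 1).toNat + 1 := by omega
      rw [h1, List.replicate_succ]
      have h2 : (x :: xs).length - ((r - 1).toNat + 1) = xs.length - (r - 1).toNat := by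
        simp [List.length_cons]
      rw [h2]
      simp
    · have : r = 0 := by omega
      subst this
      have := ih (acc ++ [d]) 0 le_rfl (by positivity)
      simp only [List.foldl_cons, if_neg hr] at *
      rw [this]
      simp [List.length_cons, List.replicate_succ]

-- B's quota differences produce the same replicate decomposition.
theorem quota_replicate (d r step : Int) (h0 : 0 ≤ r) (hle : r ≤ step) :
    (PySem.List.pyRange 0 step 1).map
      (fun i => (d * (i + 1) + min (i + 1) r) - (d * i + min i r))
    = List.replicate r.toNat (d + 1) ++ List.replicate (step - r).toNat d := by
  rw [PySem.List.pyRange_one_append 0 r step h0 hle, List.map_append]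
  congr 1
  · rw [List.eq_replicate_iff]
    refine ⟨by simp [PySem.List.length_pyRange_one], ?_⟩
    intro b hb
    rw [List.mem_map] at hb
    obtain ⟨i, hi, hb⟩ := hb
    rw [PySem.List.mem_pyRange_one] at hi
    have hmin1 : min (i + 1) r = i + 1 := by omega
    have hmin2 : min i r = i := by omega
    have hd : d * (i + 1) = d * i + d := by ring
    omega
  · rw [List.eq_replicate_iff]
    refine ⟨by simp [PySem.List.length_pyRange_one], ?_⟩
    intro b hb
    rw [List.mem_map] at hb
    obtain ⟨i, hi, hb⟩ := hb
    rw [PySem.List.mem_pyRange_one] at hi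
    have hmin1 : min (i + 1) r = r := by omega
    have hmin2 : min i r = r := by omega
    have hd : d * (i + 1) = d * i + d := by ring
    omega

-- ===== VERDICT (by name: the statement is the Claim_ definition above) =====
theorem divide_into_steps_spec : Claim_equal_divide_into_steps := by
  intro total step _hdom hpre
  unfold Spec_divide_into_steps divide_into_steps divide_into_steps_alt
  set r := PySem.Int.mod total step with hr
  set d := Int.tdiv total step with hd
  rcases lt_trichotomy step 0 with hs | hs | hs
  · -- step < 0: both sides are the empty list
    rw [PySem.List.pyRange_one_eq_nil (by omega)]
    simp
  · exact absurd hs hpre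
  · -- step > 0
    have h0 : 0 ≤ r := PySem.Int.mod_nonneg total hs
    have hlt : r < step := PySem.Int.mod_lt total hs
    have hlen : ((PySem.List.pyRange 0 step 1).length : Int) = step := by
      rw [PySem.List.length_pyRange_one]; omega
    have hfold := loop_replicate d (PySem.List.pyRange 0 step 1) [] r h0 (by omega)
    rw [hfold]
    have hquota := quota_replicate d r step h0 (le_of_lt hlt)
    simp only [hquota]
    have hlen2 : (PySem.List.pyRange 0 step 1).length = step.toNat := by omega
    have h3 : step.toNat - r.toNat = (step - r).toNat := by omega
    simp [hlen2, h3]
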